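-- pv_equiv track=rewrite | github.com/aojielian/molecular-autism-retained-core | Build_Supplementary_MasterWorkbook_v4.py | summarize_distribution
-- ===== SOURCE A (Python) =====
-- from typing import List, Dict, Optional, Iterable, Set
--
-- def normalize_str(x):
--     if x is None:
--         return ''
--     return str(x).strip()
--
-- def summarize_distribution(values: List[str]) -> str:
--     counts: Dict[str, int] = {}
--     for v in values:
--         v = normalize_str(v)
--         if v == '':
--             continue
--         counts[v] = counts.get(v, 0) + 1
--     if not counts:
--         return ''
--     parts = [f'{k}={counts[k]}' for k in sorted(counts.keys())]
--     return '; '.join(parts)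
-- ===== SOURCE B (Python) =====
-- def normalize_str(x):
--     if x is None:
--         return ''
--     return str(x).strip()
--
-- def summarize_distribution(values):
--     xs = sorted(s for s in map(normalize_str, values) if s != '')
--     parts = []
--     i = 0
--     n = len(xs)
--     while i < n:
--         j = i
--         while j < n and xs[j] == xs[i]:
--             j += 1
--         parts.append(f'{xs[i]}={j - i}')
--         i = j
--     return '; '.join(parts)
-- ===== Notes on version B (the rewrite author's own statement) =====
-- stated objective: alternative
-- what changed: Replaces the hash-count dict plus sorted(keys) pass with sort-then-group: normalize and filter once, sort the surviving strings, then walk the sorted list emitting one 'key=runlength' part per run of equal strings.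
import Mathlib
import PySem

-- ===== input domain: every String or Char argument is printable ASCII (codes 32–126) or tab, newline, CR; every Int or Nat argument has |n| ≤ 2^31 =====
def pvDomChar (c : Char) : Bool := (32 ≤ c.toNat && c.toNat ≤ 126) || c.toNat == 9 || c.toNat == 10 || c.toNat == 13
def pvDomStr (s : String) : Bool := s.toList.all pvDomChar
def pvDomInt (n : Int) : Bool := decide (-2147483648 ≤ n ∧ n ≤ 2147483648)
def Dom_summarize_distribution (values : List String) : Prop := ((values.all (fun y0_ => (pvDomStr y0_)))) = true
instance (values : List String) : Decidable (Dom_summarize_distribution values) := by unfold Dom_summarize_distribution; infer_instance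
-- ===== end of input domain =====

-- B replaces A's dict counting + sorted-keys pass by sort-then-group over runs of equal strings (alternative algorithm, same results).

-- ===== PORT A =====
-- normalize_str restricted to str inputs (the declared parameter type): str(x).strip()
def normalize_str (x : String) : String := PySem.Str.strip x

def summarize_distribution (values : List String) : String :=
  let counts : PySem.Dict String Int :=
    values.foldl (fun d v =>
      let v' := normalize_str v
      if v' = "" then d else d.insert v' (d.getD v' 0 + 1)) PySem.Dict.empty
  if counts.items = [] then ""
  else
    let parts := (PySem.List.sorted counts.keys (fun k => k) false).map
      (fun k => k ++ "=" ++ PySem.Int.toStr (counts.getD k 0))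
    PySem.Str.join "; " parts

-- ===== PORT B =====
-- the inner while-loop of Source B: one part per run of equal strings in the sorted list
def groupRuns : List String → List String
  | [] => []
  | x :: rest =>
    (x ++ "=" ++ PySem.Int.toStr ((rest.takeWhile (fun y => y == x)).length + 1))
      :: groupRuns (rest.dropWhile (fun y => y == x))
termination_by s => s.length
decreasing_by simpa using Nat.lt_succ_of_le (List.length_dropWhile_le _ _)

def summarize_distribution_alt (values : List String) : String :=
  let xs := PySem.List.sorted ((values.map normalize_str).filter (fun s => !(s == ""))) (fun k => k) false
  PySem.Str.join "; " (groupRuns xs)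

-- ===== PRECONDITION & SPEC =====
def Spec_summarize_distribution (values : List String) (out : String) : Prop := out = summarize_distribution_alt values
instance (values : List String) (out : String) : Decidable (Spec_summarize_distribution values out) := by unfold Spec_summarize_distribution; infer_instance

-- ===== CLAIM (what is proved, stated in full; the proofs are below) =====
def Claim_equal_summarize_distribution : Prop := ∀ (values : List String), Dom_summarize_distribution values → Spec_summarize_distribution values (summarize_distribution values)

-- ===== LEMMAS AND PROOFS =====

-- A's loop is the counter of the normalized, nonempty-filtered list
lemma foldA_eq_counter (values : List String) :
    values.foldl (fun d v =>
      let v' := normalize_str v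
      if v' = "" then d else d.insert v' (d.getD v' 0 + 1)) (PySem.Dict.empty : PySem.Dict String Int)
    = PySem.Dict.counter ((values.map normalize_str).filter (fun s => !(s == ""))) := by
  rw [← PySem.Dict.foldl_insert_getD_add_one_eq_counter]
  generalize (PySem.Dict.empty : PySem.Dict String Int) = d
  induction values generalizing d with
  | nil => rfl
  | cons v t ih =>
    by_cases h : normalize_str v = "" <;>
      simp [h, ih]

-- the core: on a ≤-sorted list, groupRuns emits exactly one part per distinct key,
-- keys in the order of any <-sorted enumeration D of the elements
lemma groupRuns_eq (S : List String) : S.Pairwise (· ≤ ·) → ∀ D : List String, D.Pairwise (· < ·) →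
    (∀ x, x ∈ D ↔ x ∈ S) →
    groupRuns S = D.map (fun k => k ++ "=" ++ PySem.Int.toStr (S.count k)) := by
  induction S using groupRuns.induct with
  | case1 =>
    intro _ D _ hmem
    have : D = [] := by
      cases D with
      | nil => rfl
      | cons d t => exact absurd ((hmem d).1 (List.mem_cons_self)) (by simp)
    simp [groupRuns, this]
  | case2 x rest ih =>
    intro hS D hD hmem
    -- head of D is x
    obtain ⟨d, D', rfl⟩ : ∃ d D', D = d :: D' := by
      cases D with
      | nil => exact absurd ((hmem x).2 (List.mem_cons_self)) (by simp)
      | cons d t => exact ⟨d, t, rfl⟩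
    have hxle : ∀ y ∈ rest, x ≤ y := fun y hy => (List.pairwise_cons.1 hS).1 y hy
    have hdx : d = x := by
      have hdS : d ∈ x :: rest := (hmem d).1 List.mem_cons_self
      have hxD : x ∈ d :: D' := (hmem x).2 List.mem_cons_self
      rcases List.mem_cons.1 hxD with h | h
      · exact h.symm
      · -- x ∈ D' means d < x, but d ∈ S means x ≤ d
        have hdlt : d < x := (List.pairwise_cons.1 hD).1 x h
        rcases List.mem_cons.1 hdS with h2 | h2
        · exact h2
        · exact absurd (hxle d h2) (not_le.2 hdlt)
    obtain rfl : x = d := hdx.symm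
    -- decompose rest into the run and the tail
    have hsplit : rest = rest.takeWhile (fun y => y == x) ++ rest.dropWhile (fun y => y == x) :=
      (List.takeWhile_append_dropWhile).symm
    have hrun : ∀ y ∈ rest.takeWhile (fun y => y == x), y = x := by
      intro y hy
      have := List.mem_takeWhile_imp hy
      simpa using this
    have htailPW : (rest.dropWhile (fun y => y == x)).Pairwise (· ≤ ·) :=
      ((List.pairwise_cons.1 hS).2).sublist (List.dropWhile_sublist _)
    have htl : ∀ y ∈ rest.dropWhile (fun y => y == x), x < y := by
      intro y hy
      have hyrest : y ∈ rest := (List.dropWhile_sublist _).mem hy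
      rcases hz : rest.dropWhile (fun y => y == x) with _ | ⟨z, t⟩
      · rw [hz] at hy; exact absurd hy List.not_mem_nil
      · have hzne : z ≠ x := by
          have := List.head?_dropWhile_not (fun y => y == x) rest
          rw [hz] at this
          simpa using this
        have hzrest : z ∈ rest := (List.dropWhile_sublist _).mem (by rw [hz]; exact List.mem_cons_self)
        have hxz : x < z := lt_of_le_of_ne (hxle z hzrest) (Ne.symm hzne)
        rw [hz] at hy
        rcases List.mem_cons.1 hy with h | h
        · exact h ▸ hxz
        · have hPW : (z :: t).Pairwise (· ≤ ·) := hz ▸ htailPW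
          exact lt_of_lt_of_le hxz ((List.pairwise_cons.1 hPW).1 y h)
    -- x does not occur in the tail
    have hxnot : x ∉ rest.dropWhile (fun y => y == x) := fun h => absurd (htl x h) (lt_irrefl x)
    -- count of x in S
    have hcx : (x :: rest).count x = (rest.takeWhile (fun y => y == x)).length + 1 := by
      have h1 : (rest.takeWhile (fun y => y == x)).count x = (rest.takeWhile (fun y => y == x)).length :=
        List.count_eq_length.2 (fun y hy => by simp [hrun y hy])
      have h2 : (rest.dropWhile (fun y => y == x)).count x = 0 :=
        List.count_eq_zero.2 hxnot
      rw [List.count_cons_self]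
      conv_lhs => rw [hsplit]
      rw [List.count_append]
      omega
    -- membership for the recursive call
    have hmem' : ∀ y, y ∈ D' ↔ y ∈ rest.dropWhile (fun y => y == x) := by
      intro y
      constructor
      · intro hy
        have hyne : y ≠ x := by
          have := (List.pairwise_cons.1 hD).1 y hy
          exact fun h => absurd (h ▸ this) (lt_irrefl x)
        have hyS : y ∈ x :: rest := (hmem y).1 (List.mem_cons_of_mem _ hy)
        rcases List.mem_cons.1 hyS with h | h
        · exact absurd h hyne
        · rw [hsplit] at h
          rcases List.mem_append.1 h with h | h
          · exact absurd (hrun y h) hyne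
          · exact h
      · intro hy
        have hyS : y ∈ x :: rest := List.mem_cons_of_mem _ ((List.dropWhile_sublist _).mem hy)
        have : y ∈ x :: D' := (hmem y).2 hyS
        rcases List.mem_cons.1 this with h | h
        · exact absurd (h ▸ htl y hy) (lt_irrefl x)
        · exact h
    have hcnt : ∀ k ∈ D', (x :: rest).count k = (rest.dropWhile (fun y => y == x)).count k := by
      intro k hk
      have hk' : k ∈ rest.dropWhile (fun y => y == x) := (hmem' k).1 hk
      have hkx : k ≠ x := fun h => absurd (h ▸ htl k hk') (lt_irrefl x)
      have h3 : (rest.takeWhile (fun y => y == x)).count k = 0 :=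
        List.count_eq_zero.2 (fun h => hkx (hrun k h))
      simp only [List.count_cons, beq_iff_eq]
      rw [if_neg (Ne.symm hkx)]
      conv_lhs => rw [hsplit]
      rw [List.count_append]
      omega
    rw [groupRuns, List.map_cons,
        ih htailPW D' (List.pairwise_cons.1 hD).2 hmem']
    congr 1
    · have hc : ((rest.takeWhile (fun y => y == x)).length : Int) + 1 = ((x :: rest).count x : Int) := by
        rw [hcx]; push_cast; ring
      rw [hc]
    · exact (List.map_congr_left (fun k hk => by rw [hcnt k hk])).symm

-- ===== VERDICT (by name: the statement is the Claim_ definition above) =====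
theorem summarize_distribution_spec : Claim_equal_summarize_distribution := by
  intro values _
  unfold Spec_summarize_distribution summarize_distribution summarize_distribution_alt
  simp only [foldA_eq_counter]
  set L := (values.map normalize_str).filter (fun s => !(s == "")) with hL
  rcases hLe : L with _ | ⟨a, t⟩
  · simp [PySem.Dict.items_counter, PySem.List.sorted, groupRuns, PySem.Str.join]
  · have hne : (PySem.Dict.counter L).items ≠ [] := by
      rw [hLe, PySem.Dict.items_counter]
      intro h
      have ha : a ∈ PySem.Set.ofList (a :: t) := (PySem.Set.mem_ofList _ _).2 List.mem_cons_self
      rw [List.map_eq_nil_iff.1 h] at ha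
      simp at ha
    rw [← hLe]
    rw [if_neg hne]
    congr 1
    rw [PySem.Dict.keys_counter]
    have hperm := PySem.List.sorted_perm L (fun k => k) false
    have hcount : ∀ k, (PySem.List.sorted L (fun k => k) false).count k = L.count k :=
      fun k => hperm.count_eq k
    rw [groupRuns_eq (PySem.List.sorted L (fun k => k) false)
          (by simpa using PySem.List.sorted_pairwise L (fun k => k))
          (PySem.List.sorted (PySem.Set.ofList L) (fun k => k) false)
          (by simpa using PySem.List.sorted_ofList_pairwise_lt L)
          (by intro x
              simp [PySem.List.mem_sorted, PySem.Set.mem_ofList])]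
    apply List.map_congr_left
    intro k hk
    rw [hcount k, PySem.Dict.getD_counter]
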